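-- pv_equiv track=rewrite | github.com/aplgr/zim-to-obsidian | src/zim_to_obsidian/converter.py | convert_codeblocks
-- ===== SOURCE A (Python) =====
-- from typing import Dict, List, Optional, Tuple
--
-- def convert_codeblocks(lines: List[str]) -> List[str]:
--     """Convert Zim code fences (''') to Markdown triple backticks."""
--
--     out: List[str] = []
--     in_block = False
--
--     for line in lines:
--         if line.strip() == "'''":
--             out.append("```")
--             in_block = not in_block
--             continue
--         out.append(line)
--
--     # If unbalanced, close it.
--     if in_block:
--         out.append("```")
--
--     return out
-- ===== SOURCE B (Python) =====
-- from typing import List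
--
-- def convert_codeblocks(lines: List[str]) -> List[str]:
--     """Convert Zim code fences (''') to Markdown triple backticks."""
--     def fence_at(rest):
--         return next((k for k, l in enumerate(rest) if l.strip() == "'''"), None)
--
--     out: List[str] = []
--     rest = lines
--     while True:
--         i = fence_at(rest)
--         if i is None:
--             return out + rest
--         out += rest[:i] + ["```"]
--         rest = rest[i + 1:]
--         j = fence_at(rest)
--         if j is None:
--             return out + rest + ["```"]
--         out += rest[:j] + ["```"]
--         rest = rest[j + 1:]
-- ===== Notes on version B (the rewrite author's own statement) =====
-- stated objective: alternative
-- what changed: Instead of a per-line toggle loop, B repeatedly searches for the next opening/closing fence pair, splits the list there, and emits segment + fence for each pair, closing an unmatched opening fence when no partner is found.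
import Mathlib
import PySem

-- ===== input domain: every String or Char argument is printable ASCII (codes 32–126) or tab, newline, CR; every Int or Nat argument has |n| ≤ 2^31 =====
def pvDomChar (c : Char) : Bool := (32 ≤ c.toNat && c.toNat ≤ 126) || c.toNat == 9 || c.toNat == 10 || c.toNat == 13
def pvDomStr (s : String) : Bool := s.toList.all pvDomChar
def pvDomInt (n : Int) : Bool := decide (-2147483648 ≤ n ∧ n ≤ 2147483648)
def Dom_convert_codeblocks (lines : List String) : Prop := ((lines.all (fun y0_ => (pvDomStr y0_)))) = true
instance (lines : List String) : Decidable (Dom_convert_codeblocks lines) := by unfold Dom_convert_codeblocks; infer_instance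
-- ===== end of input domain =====

-- B replaces A's per-line toggle loop by a fence-pair splitter: it scans for the next
-- opening/closing fence pair and emits whole segments (alternative decomposition, same cost).

-- ===== PORT A =====
-- A: one pass with accumulator `out` and running boolean `in_block`, toggled at each fence line.
def convert_codeblocks (lines : List String) : List String :=
  let s := lines.foldl
    (fun (st : List String × Bool) line =>
      if PySem.Str.strip line == "'''" then (st.1 ++ ["```"], !st.2)
      else (st.1 ++ [line], st.2))
    ([], false)
  if s.2 then s.1 ++ ["```"] else s.1

-- ===== PORT B =====
-- B helper: index of the first fence line, if any (Python's next(... enumerate ...)).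
def pvFenceAt (rest : List String) : Option Nat :=
  rest.findIdx? (fun l => PySem.Str.strip l == "'''")

-- B: repeatedly split at the next opening/closing fence pair, emitting segment + fence;
-- an unmatched opening fence gets a closing fence appended.
def convert_codeblocks_alt (rest : List String) : List String :=
  match h : pvFenceAt rest with
  | none => rest
  | some i =>
    match pvFenceAt (rest.drop (i + 1)) with
    | none => rest.take i ++ ["```"] ++ rest.drop (i + 1) ++ ["```"]
    | some j =>
      rest.take i ++ ["```"] ++ (rest.drop (i + 1)).take j ++ ["```"] ++
        convert_codeblocks_alt ((rest.drop (i + 1)).drop (j + 1))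
termination_by rest.length
decreasing_by
  have hne : rest ≠ [] := by
    intro hnil; rw [hnil] at h; simp [pvFenceAt] at h
  cases rest with
  | nil => exact absurd rfl hne
  | cons x xs => simp only [List.length_drop, List.length_cons]; omega

-- ===== PRECONDITION & SPEC =====
def Spec_convert_codeblocks (lines : List String) (out : List String) : Prop := out = convert_codeblocks_alt lines
instance (lines : List String) (out : List String) : Decidable (Spec_convert_codeblocks lines out) := by unfold Spec_convert_codeblocks; infer_instance

-- ===== CLAIM (what is proved, stated in full; the proofs are below) =====
def Claim_equal_convert_codeblocks : Prop := ∀ (lines : List String), Dom_convert_codeblocks lines → Spec_convert_codeblocks lines (convert_codeblocks lines)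

-- ===== LEMMAS AND PROOFS =====

-- A's fold step.
def pvStepA (st : List String × Bool) (line : String) : List String × Bool :=
  if PySem.Str.strip line == "'''" then (st.1 ++ ["```"], !st.2)
  else (st.1 ++ [line], st.2)

-- pvStepA on a non-fence line.
theorem stepA_nofence (acc : List String) (b : Bool) (x : String)
    (hx : ¬ (PySem.Str.strip x == "'''") = true) : pvStepA (acc, b) x = (acc ++ [x], b) := by
  simp [pvStepA, hx]

-- If the list has no fence, the fold appends it unchanged and keeps the flag.
theorem foldA_no_fence (rest : List String) (acc : List String) (b : Bool)
    (h : pvFenceAt rest = none) :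
    rest.foldl pvStepA (acc, b) = (acc ++ rest, b) := by
  induction rest generalizing acc with
  | nil => simp
  | cons x xs ih =>
    simp only [pvFenceAt, List.findIdx?_cons] at h
    by_cases hx : PySem.Str.strip x == "'''"
    · simp [hx] at h
    · rw [List.foldl_cons, stepA_nofence acc b x hx,
        ih (acc ++ [x]) (by simpa [pvFenceAt, hx] using h)]
      simp

-- If the first fence is at index i, the fold consumes up to it, emits "```", flips the flag.
theorem foldA_fence (rest : List String) (acc : List String) (b : Bool) (i : Nat)
    (h : pvFenceAt rest = some i) :
    rest.foldl pvStepA (acc, b)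
      = (rest.drop (i + 1)).foldl pvStepA (acc ++ rest.take i ++ ["```"], !b) := by
  induction rest generalizing acc i with
  | nil => simp [pvFenceAt] at h
  | cons x xs ih =>
    simp only [pvFenceAt, List.findIdx?_cons] at h
    by_cases hx : PySem.Str.strip x == "'''"
    · simp [hx] at h
      subst h
      simp [pvStepA, hx]
    · simp [hx] at h
      cases hfi : xs.findIdx? (fun l => PySem.Str.strip l == "'''") with
      | none => rw [hfi] at h; simp at h
      | some k =>
        rw [hfi] at h
        simp at h
        obtain ⟨a, rfl, rfl⟩ := h
        rw [List.foldl_cons, stepA_nofence acc b x hx, ih (acc ++ [x]) k hfi]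
        simp

-- Unfolding equations of B per fence case.
theorem altB_none (rest : List String) (h : pvFenceAt rest = none) :
    convert_codeblocks_alt rest = rest := by
  rw [convert_codeblocks_alt]; split
  · rfl
  · rename_i i hi; rw [h] at hi; exact absurd hi (by simp)

theorem altB_one (rest : List String) (i : Nat) (h : pvFenceAt rest = some i)
    (h1 : pvFenceAt (rest.drop (i + 1)) = none) :
    convert_codeblocks_alt rest
      = rest.take i ++ ["```"] ++ rest.drop (i + 1) ++ ["```"] := by
  rw [convert_codeblocks_alt]; split
  · rename_i hi; rw [h] at hi; exact absurd hi (by simp)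
  · rename_i i' hi; rw [h] at hi
    obtain rfl : i' = i := by simpa using hi.symm
    split
    · rfl
    · rename_i j hj; rw [h1] at hj; exact absurd hj (by simp)

theorem altB_two (rest : List String) (i j : Nat) (h : pvFenceAt rest = some i)
    (h1 : pvFenceAt (rest.drop (i + 1)) = some j) :
    convert_codeblocks_alt rest
      = rest.take i ++ ["```"] ++ (rest.drop (i + 1)).take j ++ ["```"] ++
          convert_codeblocks_alt ((rest.drop (i + 1)).drop (j + 1)) := by
  rw [convert_codeblocks_alt]; split
  · rename_i hi; rw [h] at hi; exact absurd hi (by simp)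
  · rename_i i' hi; rw [h] at hi
    obtain rfl : i' = i := by simpa using hi.symm
    split
    · rename_i hj; rw [h1] at hj; exact absurd hj (by simp)
    · rename_i j' hj; rw [h1] at hj
      obtain rfl : j' = j := by simpa using hj.symm
      rfl

-- Main invariant: finishing the fold from (acc, false) equals acc ++ B's result.
theorem foldA_eq_alt (n : Nat) : ∀ (rest : List String), rest.length ≤ n → ∀ (acc : List String),
    (if (rest.foldl pvStepA (acc, false)).2 then (rest.foldl pvStepA (acc, false)).1 ++ ["```"]
     else (rest.foldl pvStepA (acc, false)).1)
      = acc ++ convert_codeblocks_alt rest := by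
  induction n with
  | zero =>
    intro rest hlen acc
    have : rest = [] := List.eq_nil_of_length_eq_zero (Nat.le_zero.mp hlen)
    subst this
    rw [altB_none [] (by simp [pvFenceAt])]
    simp
  | succ n ih =>
    intro rest hlen acc
    cases h : pvFenceAt rest with
    | none =>
      rw [foldA_no_fence rest acc false h, altB_none rest h]
      simp
    | some i =>
      have hne : rest ≠ [] := by
        intro hnil; rw [hnil] at h; simp [pvFenceAt] at h
      rw [foldA_fence rest acc false i h]
      cases h1 : pvFenceAt (rest.drop (i + 1)) with
      | none =>
        rw [foldA_no_fence _ _ _ h1, altB_one rest i h h1]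
        simp
      | some j =>
        rw [foldA_fence _ _ _ j h1, altB_two rest i j h h1]
        have hlen2 : ((rest.drop (i + 1)).drop (j + 1)).length ≤ n := by
          cases rest with
          | nil => exact absurd rfl hne
          | cons x xs =>
            simp [List.length_drop] at hlen ⊢
            omega
        have := ih ((rest.drop (i + 1)).drop (j + 1)) hlen2
          (acc ++ rest.take i ++ ["```"] ++ (rest.drop (i + 1)).take j ++ ["```"])
        simp only [Bool.not_true, Bool.not_false]
        rw [this]
        simp

-- ===== VERDICT (by name: the statement is the Claim_ definition above) =====
theorem convert_codeblocks_spec : Claim_equal_convert_codeblocks := by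
  intro lines _
  unfold Spec_convert_codeblocks
  have h := foldA_eq_alt lines.length lines le_rfl []
  simp only [List.nil_append] at h
  rw [← h]
  rfl
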